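-- pv_equiv track=rewrite | github.com/enenchi/virtual-keyboard | keyboard.py | build_keyboard
-- ===== SOURCE A (Python) =====
-- def build_keyboard(markers):
--     # map pixel row to ids in that row
--     board = dict()
--     for id in markers:
--         row = markers[id][0][1]
--         if row in board:
--             board[row].append(id)
--         else:
--             board[row] = [id]
--     return [set(board[key]) for key in sorted(board.keys())]
-- ===== SOURCE B (Python) =====
-- def build_keyboard(markers):
--     # sort ids by their pixel row, then group consecutive equal rows in one pass
--     key = lambda i: markers[i][0][1]
--     rows = []
--     prev = None
--     for i in sorted(markers, key=key):
--         k = key(i)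
--         if rows and prev == k:
--             rows[-1].add(i)
--         else:
--             rows.append({i})
--         prev = k
--     return rows
-- ===== Notes on version B (the rewrite author's own statement) =====
-- stated objective: alternative
-- what changed: B sorts the marker ids by their row key and builds the groups in one linear scan over consecutive equal rows, instead of A's accumulate-into-a-dict-of-rows then sort-the-keys strategy.
import Mathlib
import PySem

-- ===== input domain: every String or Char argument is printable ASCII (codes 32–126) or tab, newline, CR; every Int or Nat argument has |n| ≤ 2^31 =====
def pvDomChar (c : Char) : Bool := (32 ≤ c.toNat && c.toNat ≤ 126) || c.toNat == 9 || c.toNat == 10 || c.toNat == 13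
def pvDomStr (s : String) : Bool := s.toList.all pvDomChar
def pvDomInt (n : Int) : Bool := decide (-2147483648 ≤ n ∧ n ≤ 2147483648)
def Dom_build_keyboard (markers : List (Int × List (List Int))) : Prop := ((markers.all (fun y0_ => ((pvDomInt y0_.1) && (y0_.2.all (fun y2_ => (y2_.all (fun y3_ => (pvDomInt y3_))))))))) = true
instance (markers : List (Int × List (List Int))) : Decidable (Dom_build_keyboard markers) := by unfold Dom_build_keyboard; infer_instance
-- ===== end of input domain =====

-- B groups marker ids by sorting them on their row key and scanning once for consecutive equal rows,
-- instead of A's dict-accumulate-then-sort-keys; same result, a different decomposition (objective: alternative).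

-- ===== PORT A =====
-- markers[id][0][1], with defaults where Python would raise (Pre_ excludes those inputs); used by both ports,
-- as both Pythons compute exactly this expression.
def pvRow (markers : List (Int × List (List Int))) (i : Int) : Int :=
  PySem.List.pyGetD (PySem.List.pyGetD ((PySem.Dict.mk markers).getD i []) 0 []) 1 0

def build_keyboard (markers : List (Int × List (List Int))) : List (List Int) :=
  let board : PySem.Dict Int (List Int) :=
    (markers.map (fun p => p.1)).foldl
      (fun board id =>
        let row := pvRow markers id
        if board.contains row then board.modify row [] (fun v => v ++ [id])
        else board.insert row [id])
      PySem.Dict.empty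
  (PySem.List.sorted board.keys (fun k => k) false).map
    (fun key => PySem.Set.ofList (board.getD key []))

-- ===== PORT B =====
-- loop body of Source B: extend the last group if the row repeats, else open a new group
def pvStep (f : Int → Int) (st : List (PySem.Set Int) × Option Int) (i : Int) :
    List (PySem.Set Int) × Option Int :=
  if st.1 ≠ [] ∧ st.2 = some (f i)
  then (st.1.dropLast ++ [PySem.Set.add st.1.getLast! i], some (f i))
  else (st.1 ++ [PySem.Set.ofList [i]], some (f i))

def build_keyboard_alt (markers : List (Int × List (List Int))) : List (List Int) :=
  ((PySem.List.sorted (markers.map (fun p => p.1)) (pvRow markers) false).foldl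
    (pvStep (pvRow markers)) ([], none)).1

-- ===== PRECONDITION & SPEC =====
-- Pre_ excludes exactly the inputs where Python A raises IndexError: a marker whose value is the empty
-- list, or whose first corner list has fewer than two coordinates (markers[id][0][1] fails there).
def Pre_build_keyboard (markers : List (Int × List (List Int))) : Prop :=
  ∀ p ∈ markers, p.2 ≠ [] ∧ 2 ≤ p.2.headI.length
instance (markers : List (Int × List (List Int))) : Decidable (Pre_build_keyboard markers) := by
  unfold Pre_build_keyboard; infer_instance

def pvWitness_build_keyboard : (List (Int × List (List Int))) :=
  [(1, [[0, 5]]), (2, [[3, 5]]), (3, [[1, 2]])]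

def Spec_build_keyboard (markers : List (Int × List (List Int))) (out : List (List Int)) : Prop := out = build_keyboard_alt markers
instance (markers : List (Int × List (List Int))) (out : List (List Int)) : Decidable (Spec_build_keyboard markers out) := by unfold Spec_build_keyboard; infer_instance

-- ===== CLAIM (what is proved, stated in full; the proofs are below) =====
def Claim_equal_build_keyboard : Prop := ∀ (markers : List (Int × List (List Int))), Dom_build_keyboard markers → Pre_build_keyboard markers → Spec_build_keyboard markers (build_keyboard markers)

-- ===== LEMMAS AND PROOFS =====

-- the common normal form both ports are reduced to, for the list `ids` of marker ids and row key `f`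
def pvCanon (f : Int → Int) (ids : List Int) : List (PySem.Set Int) :=
  (PySem.List.dedup (ids.map f)).map (fun r => PySem.Set.ofList (ids.filter (fun i => f i == r)))

lemma pv_foldl_add_cons (x : Int) : ∀ (l s : List Int), (∀ y ∈ l, y ≠ x) →
    List.foldl PySem.Set.add (x :: s) l = x :: List.foldl PySem.Set.add s l := by
  intro l
  induction l with
  | nil => intro s _; rfl
  | cons y l ih =>
      intro s h
      have hy : y ≠ x := h y (by simp)
      have hstep : PySem.Set.add (x :: s) y = x :: PySem.Set.add s y := by
        simp [PySem.Set.add, PySem.Set.contains, hy]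
        split_ifs <;> simp
      simp only [List.foldl_cons, hstep]
      exact ih _ (fun z hz => h z (by simp [hz]))

lemma pv_foldl_add_filter (x : Int) : ∀ (l s : List Int), x ∈ s →
    List.foldl PySem.Set.add s l = List.foldl PySem.Set.add s (l.filter (fun y => !(y == x))) := by
  intro l
  induction l with
  | nil => intro s _; rfl
  | cons y l ih =>
      intro s hx
      by_cases hy : y = x
      · subst hy
        have : PySem.Set.add s y = s := by
          simp [PySem.Set.add, PySem.Set.contains, hx]
        simp only [List.foldl_cons, this, List.filter_cons]
        simp only [beq_self_eq_true, Bool.not_true, if_neg (by simp : ¬(false = true))]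
        exact ih s hx
      · have hxmem : x ∈ PySem.Set.add s y := by
          simp [PySem.Set.add]; split_ifs <;> simp [hx]
        simp only [List.foldl_cons, List.filter_cons]
        rw [if_pos (by simp [hy])]
        simp only [List.foldl_cons]
        exact ih _ hxmem

lemma pv_ofList_cons (x : Int) (l : List Int) :
    PySem.Set.ofList (x :: l) = x :: PySem.Set.ofList (l.filter (fun y => !(y == x))) := by
  have h0 : PySem.Set.add PySem.Set.empty x = [x] := by
    simp [PySem.Set.add, PySem.Set.empty, PySem.Set.contains]
  simp only [PySem.Set.ofList, List.foldl_cons, h0]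
  rw [pv_foldl_add_filter x l [x] (by simp)]
  exact pv_foldl_add_cons x _ [] (fun y hy => by
    have := List.of_mem_filter hy
    simpa using this)

lemma pv_ofList_concat (g : List Int) (i : Int) :
    PySem.Set.ofList (g ++ [i]) = PySem.Set.add (PySem.Set.ofList g) i := by
  simp [PySem.Set.ofList, List.foldl_append]

lemma pv_foldl_add_sublist : ∀ (l s : List Int), ∃ m, m.Sublist l ∧
    List.foldl PySem.Set.add s l = s ++ m := by
  intro l
  induction l with
  | nil => intro s; exact ⟨[], by simp⟩
  | cons x l ih =>
      intro s
      by_cases hx : PySem.Set.contains s x = true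
      · obtain ⟨m, hm, he⟩ := ih s
        refine ⟨m, hm.cons x, ?_⟩
        have hadd : PySem.Set.add s x = s := by unfold PySem.Set.add; rw [if_pos hx]
        rw [List.foldl_cons, hadd]
        exact he
      · obtain ⟨m, hm, he⟩ := ih (s ++ [x])
        refine ⟨x :: m, hm.cons₂ x, ?_⟩
        simp only [List.foldl_cons, PySem.Set.add, if_neg hx, he, List.append_assoc,
          List.singleton_append]

lemma pv_dedup_pairwise_lt (l : List Int) (h : l.Pairwise (· ≤ ·)) :
    (PySem.List.dedup l).Pairwise (· < ·) := by
  obtain ⟨m, hm, he⟩ := pv_foldl_add_sublist l []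
  have hd : PySem.List.dedup l = m := by
    simpa [PySem.List.dedup, PySem.Set.ofList, PySem.Set.empty] using he
  have hle : (PySem.List.dedup l).Pairwise (· ≤ ·) := hd ▸ h.sublist hm
  have hne : (PySem.List.dedup l).Nodup := by
    rw [PySem.List.dedup_eq_ofList]; exact PySem.Set.nodup_ofList l
  exact (hle.and hne).imp (fun {a b} hab => lt_of_le_of_ne hab.1 hab.2)

lemma pv_filter_insertBy (f : Int → Int) (x r : Int) : ∀ (ys : List Int),
    ys.Pairwise (fun a b => f a ≤ f b) →
    (PySem.List.insertBy (fun a b => decide (f a < f b)) x ys).filter (fun y => f y == r)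
      = ys.filter (fun y => f y == r) ++ (if f x == r then [x] else []) := by
  intro ys
  induction ys with
  | nil =>
      intro _
      by_cases hr : (f x == r) = true <;> simp [PySem.List.insertBy, hr]
  | cons y ys ih =>
      intro h
      rw [List.pairwise_cons] at h
      by_cases hlt : f x < f y
      · have hins : PySem.List.insertBy (fun a b => decide (f a < f b)) x (y :: ys)
            = x :: y :: ys := by
          simp [PySem.List.insertBy, hlt]
        rw [hins]
        by_cases hr : (f x == r) = true
        · have hx : f x = r := by simpa using hr
          have hnil : (y :: ys).filter (fun z => f z == r) = [] := by
            apply List.filter_eq_nil_iff.mpr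
            intro z hz
            have hyz : f y ≤ f z := by
              rcases List.mem_cons.mp hz with rfl | hz'
              · exact le_refl _
              · exact h.1 z hz'
            have : r < f z := lt_of_lt_of_le (hx ▸ hlt) hyz
            simp [ne_of_gt this]
          rw [List.filter_cons, if_pos hr, hnil]
          simp [hr]
        · rw [List.filter_cons, if_neg hr]
          simp [hr]
      · have hins : PySem.List.insertBy (fun a b => decide (f a < f b)) x (y :: ys)
            = y :: PySem.List.insertBy (fun a b => decide (f a < f b)) x ys := by
          simp [PySem.List.insertBy, hlt]
        rw [hins, List.filter_cons, List.filter_cons, ih h.2]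
        by_cases hy : (f y == r) = true <;> simp [hy]

lemma pv_filter_sorted (f : Int → Int) (r : Int) (xs : List Int) :
    (PySem.List.sorted xs f false).filter (fun y => f y == r) = xs.filter (fun y => f y == r) := by
  induction xs using List.reverseRecOn with
  | nil => rfl
  | append_singleton l x ih =>
      rw [PySem.List.sorted_eq_foldl_insertBy, List.foldl_append, List.foldl_cons, List.foldl_nil,
        ← PySem.List.sorted_eq_foldl_insertBy]
      rw [pv_filter_insertBy f x r _ (PySem.List.sorted_pairwise l f), ih, List.filter_append]
      split_ifs <;> simp_all

lemma pv_groupFold_aux (f : Int → Int) : ∀ (ids : List Int) (rows0 : List (PySem.Set Int))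
    (g : List Int) (p : Int),
    ids.Pairwise (fun a b => f a ≤ f b) → (∀ j ∈ ids, p ≤ f j) →
    (ids.foldl (pvStep f) (rows0 ++ [PySem.Set.ofList g], some p)).1
      = rows0 ++ PySem.Set.ofList (g ++ ids.filter (fun i => f i == p))
          :: (PySem.List.dedup ((ids.filter (fun i => !(f i == p))).map f)).map
              (fun r => PySem.Set.ofList (ids.filter (fun i => f i == r))) := by
  intro ids
  induction ids with
  | nil => intro rows0 g p _ _; simp [PySem.List.dedup, PySem.Set.ofList, PySem.Set.empty]
  | cons i t ih =>
      intro rows0 g p hpw hge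
      rw [List.pairwise_cons] at hpw
      by_cases hk : f i = p
      · have hstep : pvStep f (rows0 ++ [PySem.Set.ofList g], some p) i
            = (rows0 ++ [PySem.Set.ofList (g ++ [i])], some p) := by
          simp [pvStep, hk, pv_ofList_concat]
        rw [List.foldl_cons, hstep, ih rows0 (g ++ [i]) p hpw.2
          (fun j hj => le_trans (hk ▸ hpw.1 j hj) (le_refl _))]
        have h1 : (i :: t).filter (fun j => f j == p) = i :: t.filter (fun j => f j == p) := by
          simp [hk]
        have h2 : (i :: t).filter (fun j => !(f j == p)) = t.filter (fun j => !(f j == p)) := by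
          simp [hk]
        rw [h1, h2]
        congr 2
        · simp [List.append_assoc]
        · apply List.map_congr_left
          intro r hr
          have hrne : r ≠ p := by
            rw [PySem.List.dedup_eq_ofList, PySem.Set.mem_ofList] at hr
            obtain ⟨j, hj, rfl⟩ := List.mem_map.mp hr
            have := List.of_mem_filter hj
            simpa using this
          simp [hk, Ne.symm hrne]
      · have hplt : ∀ j ∈ (i :: t), p < f j := by
          intro j hj
          rcases List.mem_cons.mp hj with rfl | hj
          · exact lt_of_le_of_ne (hge j (by simp)) (Ne.symm hk)
          · exact lt_of_lt_of_le (lt_of_le_of_ne (hge i (by simp)) (Ne.symm hk)) (hpw.1 j hj)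
        have hstep : pvStep f (rows0 ++ [PySem.Set.ofList g], some p) i
            = ((rows0 ++ [PySem.Set.ofList g]) ++ [PySem.Set.ofList [i]], some (f i)) := by
          have hne : p ≠ f i := Ne.symm hk
          simp [pvStep, hne]
        rw [List.foldl_cons, hstep, ih (rows0 ++ [PySem.Set.ofList g]) [i] (f i) hpw.2 hpw.1]
        have hfilp : (i :: t).filter (fun j => f j == p) = [] := by
          apply List.filter_eq_nil_iff.mpr
          intro j hj
          simpa using (ne_of_gt (hplt j hj))
        have hfilnp : (i :: t).filter (fun j => !(f j == p)) = i :: t := by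
          apply List.filter_eq_self.mpr
          intro j hj
          simpa using (ne_of_gt (hplt j hj))
        rw [hfilp, hfilnp, List.append_nil]
        have hded : PySem.List.dedup ((i :: t).map f)
            = f i :: PySem.List.dedup ((t.map f).filter (fun y => !(y == f i))) := by
          simp only [List.map_cons, PySem.List.dedup_eq_ofList]
          exact pv_ofList_cons (f i) (t.map f)
        rw [hded]
        have hmapfil : (t.map f).filter (fun y => !(y == f i))
            = (t.filter (fun j => !(f j == f i))).map f := by
          rw [List.filter_map]; rfl
        simp only [List.map_cons, List.append_assoc, List.singleton_append]
        rw [hmapfil]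
        have hhead : List.filter (fun j => f j == f i) (i :: t)
            = i :: List.filter (fun j => f j == f i) t := by simp
        rw [hhead]
        have hmaps : List.map (fun r => PySem.Set.ofList (List.filter (fun j => f j == r) (i :: t)))
              (PySem.List.dedup (List.map f (List.filter (fun j => !(f j == f i)) t)))
            = List.map (fun r => PySem.Set.ofList (List.filter (fun j => f j == r) t))
              (PySem.List.dedup (List.map f (List.filter (fun j => !(f j == f i)) t))) := by
          apply List.map_congr_left
          intro r hr
          have hrne : r ≠ f i := by
            rw [PySem.List.dedup_eq_ofList, PySem.Set.mem_ofList] at hr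
            obtain ⟨j, hj, rfl⟩ := List.mem_map.mp hr
            have := List.of_mem_filter hj
            simpa using this
          simp [Ne.symm hrne]
        rw [hmaps]

lemma pv_groupFold (f : Int → Int) (ids : List Int)
    (h : ids.Pairwise (fun a b => f a ≤ f b)) :
    (ids.foldl (pvStep f) ([], none)).1 = pvCanon f ids := by
  cases ids with
  | nil => rfl
  | cons i t =>
      rw [List.pairwise_cons] at h
      have hstep : pvStep f (([] : List (PySem.Set Int)), (none : Option Int)) i
          = (([] : List (PySem.Set Int)) ++ [PySem.Set.ofList [i]], some (f i)) := by
        simp [pvStep]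
      rw [List.foldl_cons, hstep, pv_groupFold_aux f t [] [i] (f i) h.2 h.1]
      unfold pvCanon
      have hded : PySem.List.dedup ((i :: t).map f)
          = f i :: PySem.List.dedup ((t.map f).filter (fun y => !(y == f i))) := by
        simp only [List.map_cons, PySem.List.dedup_eq_ofList]
        exact pv_ofList_cons (f i) (t.map f)
      rw [hded]
      have hmapfil : (t.map f).filter (fun y => !(y == f i))
          = (t.filter (fun j => !(f j == f i))).map f := by
        rw [List.filter_map]; rfl
      simp only [List.map_cons, List.nil_append]
      congr 1
      · simp
      · rw [hmapfil]
        apply List.map_congr_left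
        intro r hr
        have hrne : r ≠ f i := by
          rw [PySem.List.dedup_eq_ofList, PySem.Set.mem_ofList] at hr
          obtain ⟨j, hj, rfl⟩ := List.mem_map.mp hr
          have := List.of_mem_filter hj
          simpa using this
        simp [Ne.symm hrne]

-- A's board characterised: keys are the distinct rows in first-occurrence order, each bucket is the
-- ids with that row in original order.
lemma pv_A_canon (markers : List (Int × List (List Int))) :
    build_keyboard markers
      = (PySem.List.sorted (PySem.List.dedup ((markers.map (fun p => p.1)).map (pvRow markers)))
          (fun k => k) false).map
          (fun r => PySem.Set.ofList ((markers.map (fun p => p.1)).filter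
            (fun i => pvRow markers i == r))) := by
  unfold build_keyboard
  have hfun : (fun (board : PySem.Dict Int (List Int)) id =>
        let row := pvRow markers id
        if board.contains row then board.modify row [] (fun v => v ++ [id])
        else board.insert row [id])
      = fun (board : PySem.Dict Int (List Int)) id =>
        board.modify (pvRow markers id) [] (fun v => v ++ [id]) := by
    funext b id
    by_cases h : b.contains (pvRow markers id) = true
    · simp [h]
    · simp only [Bool.not_eq_true] at h
      simp [h, PySem.Dict.modify, PySem.Dict.getD_of_not_contains b [] h]
  rw [hfun]
  have hkeys : ((markers.map (fun p => p.1)).foldl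
        (fun (d : PySem.Dict Int (List Int)) id =>
          d.modify (pvRow markers id) [] (fun v => v ++ [id])) PySem.Dict.empty).keys
      = PySem.List.dedup ((markers.map (fun p => p.1)).map (pvRow markers)) := by
    rw [PySem.Dict.keys_foldl_modify_key (markers.map (fun p => p.1)) (pvRow markers)
      ([] : List Int) (fun _ x => fun v => v ++ [x]) PySem.Dict.empty]
    simp [PySem.Dict.keys_empty, PySem.Set.update, PySem.Set.ofList, PySem.List.dedup,
      PySem.Set.empty]
  have hpair : (markers.map (fun p => p.1)).foldl
        (fun (d : PySem.Dict Int (List Int)) id =>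
          d.modify (pvRow markers id) [] (fun v => v ++ [id])) PySem.Dict.empty
      = ((markers.map (fun p => p.1)).map (fun id => (pvRow markers id, id))).foldl
          (fun (d : PySem.Dict Int (List Int)) p => d.modify p.1 [] (fun v => v ++ [p.2]))
          PySem.Dict.empty := by
    conv_rhs => rw [List.foldl_map]
  have hgetD : ∀ r, ((markers.map (fun p => p.1)).foldl
        (fun (d : PySem.Dict Int (List Int)) id =>
          d.modify (pvRow markers id) [] (fun v => v ++ [id])) PySem.Dict.empty).getD r []
      = (markers.map (fun p => p.1)).filter (fun i => pvRow markers i == r) := by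
    intro r
    rw [hpair, PySem.Dict.getD_foldl_modify_append, PySem.Dict.getD_empty, List.nil_append,
      List.filter_map]
    simp [Function.comp_def]
  simp only [hkeys]
  apply List.map_congr_left
  intro r _
  rw [hgetD r]

-- ===== VERDICT (by name: the statement is the Claim_ definition above) =====
theorem build_keyboard_spec : Claim_equal_build_keyboard := by
  intro markers _ _
  unfold Spec_build_keyboard
  rw [pv_A_canon]
  unfold build_keyboard_alt
  set f := pvRow markers with hf
  set ks := markers.map (fun p => p.1) with hks
  rw [pv_groupFold f _ (PySem.List.sorted_pairwise ks f)]
  unfold pvCanon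
  have hsorted : PySem.List.sorted (PySem.List.dedup (ks.map f)) (fun k => k) false
      = PySem.List.dedup ((PySem.List.sorted ks f false).map f) := by
    apply PySem.List.sorted_eq_of_perm_of_pairwise_lt
    · apply (List.perm_ext_iff_of_nodup ?_ ?_).mpr
      · intro x
        rw [PySem.List.dedup_eq_ofList, PySem.List.dedup_eq_ofList,
          PySem.Set.mem_ofList, PySem.Set.mem_ofList]
        exact ((PySem.List.sorted_perm ks f false).map f).mem_iff
      · rw [PySem.List.dedup_eq_ofList]; exact PySem.Set.nodup_ofList _
      · rw [PySem.List.dedup_eq_ofList]; exact PySem.Set.nodup_ofList _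
    · exact pv_dedup_pairwise_lt _ (PySem.List.sorted_map_key_pairwise ks f)
  rw [hsorted]
  apply List.map_congr_left
  intro r _
  rw [pv_filter_sorted f r ks]
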